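-- pv_equiv track=rewrite | github.com/navneetsingh-01/console-access-automation | main.py | found_device
-- ===== SOURCE A (Python) =====
-- def found_device(line, sitecode):
--     t_line = line.lower()
--     t_sitecode = sitecode.lower()
--     l = t_line.find(t_sitecode)
--     if l == -1:
--         return ""
--     cnt = 0
--     j = l
--     i = l
--     while j < len(t_line):
--         if cnt < 2:
--             if t_line[j] == '-':
--                 cnt += 1
--         else:
--             if not ((t_line[j] >= 'a' and t_line[j] <= 'z') or (t_line[j] >= '0' and t_line[j] <= '9')):
--                 device = line[i:j]
--                 return device
--         j += 1
--
--     return ""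
-- ===== SOURCE B (Python) =====
-- def found_device(line, sitecode):
--     t_line = line.lower()
--     l = t_line.find(sitecode.lower())
--     if l == -1:
--         return ""
--     dashes = [k for k, ch in enumerate(t_line) if k >= l and ch == '-']
--     if len(dashes) < 2:
--         return ""
--     stops = [k for k, ch in enumerate(t_line)
--              if k > dashes[1] and not ('a' <= ch <= 'z' or '0' <= ch <= '9')]
--     if not stops:
--         return ""
--     return line[l:stops[0]]
-- ===== Notes on version B (the rewrite author's own statement) =====
-- stated objective: alternative
-- what changed: Replaced A's single-pass dash-counting state machine with two staged comprehensions over enumerate(t_line) that materialise the list of dash positions and the list of stop positions, reading the answer off dashes[1] and stops[0].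
import Mathlib
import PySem

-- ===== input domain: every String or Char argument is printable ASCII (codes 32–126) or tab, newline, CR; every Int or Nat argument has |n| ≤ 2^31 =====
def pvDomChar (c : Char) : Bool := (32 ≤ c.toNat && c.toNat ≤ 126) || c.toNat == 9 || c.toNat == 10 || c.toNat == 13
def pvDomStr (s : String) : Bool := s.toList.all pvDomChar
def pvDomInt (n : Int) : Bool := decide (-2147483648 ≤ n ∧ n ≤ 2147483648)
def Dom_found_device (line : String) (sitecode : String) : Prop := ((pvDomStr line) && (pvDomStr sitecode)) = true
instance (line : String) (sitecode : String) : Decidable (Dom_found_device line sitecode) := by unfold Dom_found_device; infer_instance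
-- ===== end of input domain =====

-- B replaces A's single-pass dash-counting state machine by two staged full-string
-- comprehensions over enumerate (an index list of dashes, an index list of stop positions)
-- and list indexing into them (alternative decomposition; return value only, no mutation).

-- ===== PORT A =====
-- the while loop of A: j scans t (the lowercased line), cnt counts dashes, i = the match start
def fdLoopA (orig t : List Char) (i j cnt : Nat) : String :=
  if h : j < t.length then
    if cnt < 2 then
      fdLoopA orig t i (j + 1) (if t[j] = '-' then cnt + 1 else cnt)
    else
      if ¬ (('a' ≤ t[j] ∧ t[j] ≤ 'z') ∨ ('0' ≤ t[j] ∧ t[j] ≤ '9')) then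
        String.ofList (PySem.List.slice orig (some (i : Int)) (some (j : Int)))
      else
        fdLoopA orig t i (j + 1) cnt
  else ""
termination_by t.length - j

def found_device (line : String) (sitecode : String) : String :=
  let t_line := PySem.Str.lower line
  let t_sitecode := PySem.Str.lower sitecode
  let l := PySem.Str.find t_line t_sitecode
  if l = -1 then ""
  else fdLoopA line.toList t_line.toList l.toNat l.toNat 0

-- ===== PORT B =====
-- Source B: two list comprehensions over enumerate(t_line) build the dash-index list and the
-- stop-index list; the answer is read off dashes[1] and stops[0].
def found_device_alt (line : String) (sitecode : String) : String :=
  let t_line := PySem.Str.lower line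
  let l := PySem.Str.find t_line (PySem.Str.lower sitecode)
  if l = -1 then ""
  else
    let dashes := ((PySem.List.enumerate t_line.toList 0).filter
        (fun p => decide (p.1 ≥ l) && decide (p.2 = '-'))).map (fun p => p.1)
    if dashes.length < 2 then ""
    else
      let stops := ((PySem.List.enumerate t_line.toList 0).filter
        (fun p => decide (p.1 > (dashes[1]! : Int)) &&
          !(decide (('a' ≤ p.2 ∧ p.2 ≤ 'z') ∨ ('0' ≤ p.2 ∧ p.2 ≤ '9'))))).map (fun p => p.1)
      if stops = [] then ""
      else String.ofList (PySem.List.slice line.toList (some l) (some stops.head!))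

-- ===== PRECONDITION & SPEC =====
def Spec_found_device (line : String) (sitecode : String) (out : String) : Prop := out = found_device_alt line sitecode
instance (line : String) (sitecode : String) (out : String) : Decidable (Spec_found_device line sitecode out) := by unfold Spec_found_device; infer_instance

-- ===== CLAIM (what is proved, stated in full; the proofs are below) =====
def Claim_equal_found_device : Prop := ∀ (line : String) (sitecode : String), Dom_found_device line sitecode → Spec_found_device line sitecode (found_device line sitecode)

-- ===== LEMMAS AND PROOFS =====

-- first index k ≥ j with P t[k]
def firstIdx (t : List Char) (j : Nat) (P : Char → Bool) : Option Nat :=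
  if h : j < t.length then
    if P t[j] then some j else firstIdx t (j + 1) P
  else none
termination_by t.length - j

theorem firstIdx_spec (t : List Char) (j d : Nat) (P : Char → Bool)
    (h : firstIdx t j P = some d) : j ≤ d ∧ d < t.length := by
  unfold firstIdx at h
  split at h
  · rename_i hj
    split at h
    · cases h; exact ⟨le_rfl, hj⟩
    · obtain ⟨h1, h2⟩ := firstIdx_spec t (j+1) d P h
      exact ⟨by omega, h2⟩
  · cases h
termination_by t.length - j

-- the list of indices k ≥ s (as Ints) with P c, scanning u = t.drop s
def glIdx (P : Char → Bool) : List Char → Nat → List Int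
  | [], _ => []
  | c :: cs, s => (if P c then [(s : Int)] else []) ++ glIdx P cs (s + 1)

theorem map_fst_filter_enum (u : List Char) (s : Nat) (P : Char → Bool) :
    ((PySem.List.enumerate u (s : Int)).filter (fun p => P p.2)).map (fun p => p.1)
      = glIdx P u s := by
  induction u generalizing s with
  | nil => simp [PySem.List.enumerate_nil, glIdx]
  | cons c cs ih =>
    rw [PySem.List.enumerate_cons]
    by_cases hP : P c
    · simp only [List.filter_cons, hP, glIdx]
      have := ih (s + 1)
      push_cast at this ⊢
      simp [this]
    · simp only [List.filter_cons, hP, glIdx]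
      have := ih (s + 1)
      push_cast at this ⊢
      simp [this]

theorem enum_filter_from (t : List Char) (j : Nat) (hj : j ≤ t.length)
    (P : Char → Bool) (Q : Int × Char → Bool)
    (hQ : ∀ (k : Nat) (c : Char), Q ((k : Int), c) = (decide (j ≤ k) && P c)) :
    ((PySem.List.enumerate t 0).filter Q).map (fun p => p.1) = glIdx P (t.drop j) j := by
  conv_lhs => rw [← List.take_append_drop j t]
  rw [PySem.List.enumerate_append, List.filter_append, List.map_append]
  have hlen : (t.take j).length = j := by simp [hj]
  have h1 : (PySem.List.enumerate (t.take j) 0).filter Q = [] := by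
    rw [List.filter_eq_nil_iff]
    intro p hp
    obtain ⟨k, hk, rfl⟩ := (PySem.List.mem_enumerate_iff _ _ _).mp hp
    rw [hlen] at hk
    simp only [zero_add]
    rw [hQ]
    simp [Nat.not_le.mpr hk]
  rw [h1]
  simp only [List.map_nil, List.nil_append, zero_add, hlen]
  have h2 : (PySem.List.enumerate (t.drop j) (j : Int)).filter Q
      = (PySem.List.enumerate (t.drop j) (j : Int)).filter (fun p => P p.2) := by
    apply List.filter_congr
    intro p hp
    obtain ⟨k, hk, rfl⟩ := (PySem.List.mem_enumerate_iff _ _ _).mp hp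
    have : (j : Int) + (k : Int) = ((j + k : Nat) : Int) := by push_cast; ring
    rw [this, hQ]
    simp
  rw [h2, map_fst_filter_enum]

theorem glIdx_drop (t : List Char) (j : Nat) (P : Char → Bool) (hj : j ≤ t.length) :
    glIdx P (t.drop j) j =
      (match firstIdx t j P with
        | none => []
        | some d => (d : Int) :: glIdx P (t.drop (d + 1)) (d + 1)) := by
  rw [firstIdx.eq_def]
  by_cases hjl : j < t.length
  · rw [dif_pos hjl]
    have hdrop : t.drop j = t[j] :: t.drop (j + 1) := by
      rw [List.getElem_cons_drop]
    rw [hdrop]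
    simp only [glIdx]
    by_cases hP : P t[j]
    · rw [if_pos hP, if_pos hP]
      simp
    · rw [if_neg hP, if_neg hP]
      simp only [List.nil_append]
      exact glIdx_drop t (j + 1) P (by omega)
  · rw [dif_neg hjl]
    rw [List.drop_eq_nil_of_le (by omega)]
    rfl
termination_by t.length - j

theorem fdLoopA_phase1 (orig t : List Char) (i j cnt : Nat) (hc : cnt < 2) :
    fdLoopA orig t i j cnt =
      (match firstIdx t j (fun c => decide (c = '-')) with
        | none => ""
        | some d => fdLoopA orig t i (d + 1) (cnt + 1)) := by
  rw [fdLoopA.eq_def, firstIdx.eq_def]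
  by_cases hj : j < t.length
  · rw [dif_pos hj, dif_pos hj, if_pos hc]
    by_cases hd : t[j] = '-'
    · rw [if_pos hd, if_pos (by simp [hd])]
    · rw [if_neg hd, if_neg (by simp [hd])]
      exact fdLoopA_phase1 orig t i (j+1) cnt hc
  · rw [dif_neg hj, dif_neg hj]
termination_by t.length - j

theorem fdLoopA_phase2 (orig t : List Char) (i j : Nat) :
    fdLoopA orig t i j 2 =
      (match firstIdx t j
          (fun c => !(decide (('a' ≤ c ∧ c ≤ 'z') ∨ ('0' ≤ c ∧ c ≤ '9')))) with
        | none => ""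
        | some e => String.ofList (PySem.List.slice orig (some (i : Int)) (some (e : Int)))) := by
  rw [fdLoopA.eq_def, firstIdx.eq_def]
  by_cases hjl : j < t.length
  · rw [dif_pos hjl, dif_pos hjl, if_neg (by omega : ¬ (2 : Nat) < 2)]
    by_cases ha : ('a' ≤ t[j] ∧ t[j] ≤ 'z') ∨ ('0' ≤ t[j] ∧ t[j] ≤ '9')
    · rw [if_neg (not_not_intro ha), if_neg (by simp [ha])]
      exact fdLoopA_phase2 orig t i (j+1)
    · rw [if_pos ha, if_pos (by simp [ha])]
  · rw [dif_neg hjl, dif_neg hjl]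
termination_by t.length - j

set_option maxHeartbeats 1000000 in
theorem found_device_eq_alt (line sitecode : String) :
    found_device line sitecode = found_device_alt line sitecode := by
  simp only [found_device, found_device_alt]
  set t := PySem.Str.lower line with ht
  set l := PySem.Str.find t (PySem.Str.lower sitecode) with hl
  by_cases hneg : l = -1
  · rw [if_pos hneg, if_pos hneg]
  · rw [if_neg hneg, if_neg hneg]
    have hfind : l = PySem.Chars.find t.toList (PySem.Str.lower sitecode).toList := by
      rw [hl]; simp
    have h1 := PySem.Chars.neg_one_le_find t.toList (PySem.Str.lower sitecode).toList
    have h2 := PySem.Chars.find_le_length t.toList (PySem.Str.lower sitecode).toList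
    rw [← hfind] at h1 h2
    have hlnat : l = ((l.toNat : Nat) : Int) := by omega
    have hjn : l.toNat ≤ t.toList.length := by omega
    -- reduce B's dash comprehension
    have hdash : ((PySem.List.enumerate t.toList 0).filter
          (fun p => decide (p.1 ≥ l) && decide (p.2 = '-'))).map (fun p => p.1)
        = glIdx (fun c => decide (c = '-')) (t.toList.drop l.toNat) l.toNat := by
      apply enum_filter_from t.toList l.toNat hjn
      intro k c
      simp only [ge_iff_le]
      congr 1
      rw [hlnat]
      exact decide_eq_decide.mpr (by omega)
    rw [fdLoopA_phase1 _ _ _ _ 0 (by omega)]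
    rw [hdash, glIdx_drop _ _ _ hjn]
    cases hfd1 : firstIdx t.toList l.toNat (fun c => decide (c = '-')) with
    | none => simp
    | some d1 =>
      obtain ⟨_, hd1len⟩ := firstIdx_spec _ _ _ _ hfd1
      simp only []
      rw [fdLoopA_phase1 _ _ _ _ (0+1) (by omega)]
      have hg2 := glIdx_drop t.toList (d1 + 1) (fun c => decide (c = '-')) (by omega)
      cases hfd2 : firstIdx t.toList (d1 + 1) (fun c => decide (c = '-')) with
      | none =>
        rw [hfd2] at hg2
        simp only [] at hg2
        simp [hg2]
      | some d2 =>
        obtain ⟨_, hd2len⟩ := firstIdx_spec _ _ _ _ hfd2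
        rw [hfd2] at hg2
        simp only [] at hg2
        simp only []
        rw [fdLoopA_phase2]
        simp only [hg2, List.length_cons, List.getElem!_cons_succ, List.getElem!_cons_zero]
        rw [if_neg (by omega)]
        -- reduce B's stop comprehension
        have hstop : ((PySem.List.enumerate t.toList 0).filter
              (fun p => decide (p.1 > (d2 : Int)) &&
                !(decide (('a' ≤ p.2 ∧ p.2 ≤ 'z') ∨ ('0' ≤ p.2 ∧ p.2 ≤ '9'))))).map (fun p => p.1)
            = glIdx (fun c => !(decide (('a' ≤ c ∧ c ≤ 'z') ∨ ('0' ≤ c ∧ c ≤ '9'))))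
                (t.toList.drop (d2 + 1)) (d2 + 1) := by
          apply enum_filter_from t.toList (d2 + 1) (by omega)
          intro k c
          simp only [gt_iff_lt]
          congr 1
          exact decide_eq_decide.mpr (by omega)
        have hg3 := glIdx_drop t.toList (d2 + 1)
            (fun c => !(decide (('a' ≤ c ∧ c ≤ 'z') ∨ ('0' ≤ c ∧ c ≤ '9')))) (by omega)
        cases hfe : firstIdx t.toList (d2 + 1)
            (fun c => !(decide (('a' ≤ c ∧ c ≤ 'z') ∨ ('0' ≤ c ∧ c ≤ '9')))) with
        | none =>
          rw [hfe] at hg3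
          simp only [] at hg3
          simp only [hstop, hg3]
          simp
        | some e =>
          rw [hfe] at hg3
          simp only [] at hg3
          simp only [hstop, hg3]
          rw [if_neg (by simp)]
          simp only [List.head!_cons]
          rw [← hlnat]

-- ===== VERDICT (by name: the statement is the Claim_ definition above) =====
theorem found_device_spec : Claim_equal_found_device := by
  intro line sitecode _
  unfold Spec_found_device
  exact found_device_eq_alt line sitecode
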